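-- pv_equiv track=rewrite | github.com/picokatx/TUCORE-GCN-Project | tucore_gcn_transformers/tucore_gcn_bert_pipeline.py | build_entity_turn_relations
-- ===== SOURCE A (Python) =====
-- from typing import Any, Dict, List, Union
--
-- def build_entity_turn_relations(
--     input_ids: List[int],
--     mention_ids: List[int],
--     entity_1: List[int],
--     entity_2: List[int],
-- ):
--     r"""Build speaker-dialog edge data
--
--     Adapted from from [https://github.com/BlackNoodle/TUCORE-GCN/blob/main/data.py]. Previously named make_entity_edges_infor
--
--     Creates a mapping of dialog indexes (mention_id) to each speaker_id.
--
--     Modifications Summary: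
--         added entity_1 and entity_2 args so we do not have to parse mention_ids for them.
--         renamed return dict to entity_1, entity_2 for consistency
--
--     Usage:
--     tokens: [CLS] {speaker_1} howdy ! i ' m flowey , flowey the flower ! {speaker_2} hello flowey ! [SEP] {speaker_2} [SEP] flowey [SEP] [PAD] (...) [PAD]
--
--     ```python
--     >>> input_ids = [101, 1, 100, 999, 1045, 1005, 1049, 100, 1010, 100, 1996, 6546, 999, 2, 7592, 100, 999, 102, 2, 102, 100, 102, 0, (...), 0]
--     >>> speaker_id = [0,1,1,1,1,1,1,1,1,1,1,1,1,2,2,2,2,0,2,0,0,0,0,(...),0]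
--     >>> mention_id = [0,1,1,1,1,1,1,1,1,1,1,1,1,2,2,2,2,0,3,0,4,0,0,(...),0]
--     >>> build_entity_turn_relations(input_ids, mention_id, [2], [100])
--     >>> {'h': [2, 3], 't': [1, 1, 1, 2, 4]}
--     ```
--     """
--     entity_turn_edges = {"entity_1": [], "entity_2": []}
--     for i in range(len(input_ids) - len(entity_1)):
--         if input_ids[i : i + len(entity_1)] == entity_1:
--             entity_turn_edges["entity_1"].append(mention_ids[i])
--     for i in range(len(input_ids) - len(entity_2)):
--         if input_ids[i : i + len(entity_2)] == entity_2:
--             entity_turn_edges["entity_2"].append(mention_ids[i])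
--     return entity_turn_edges
-- ===== SOURCE B (Python) =====
-- def build_entity_turn_relations(
--     input_ids,
--     mention_ids,
--     entity_1,
--     entity_2,
-- ):
--     # Build a value -> positions index once, then verify an entity only at the
--     # candidate positions of its first token inside the original search window
--     # (starts strictly below len(input_ids) - len(entity)).
--     index = {}
--     for i, v in enumerate(input_ids):
--         index.setdefault(v, []).append(i)
--
--     def mentions(entity):
--         m = len(entity)
--         limit = len(input_ids) - m
--         return [
--             mention_ids[i]
--             for i in index.get(entity[0], [])
--             if i < limit and input_ids[i : i + m] == entity
--         ]
--
--     return {"entity_1": mentions(entity_1), "entity_2": mentions(entity_2)}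
-- ===== Notes on version B (the rewrite author's own statement) =====
-- stated objective: alternative
-- what changed: B builds a value-to-positions index over input_ids once and verifies each entity only at the candidate positions of its first token within A's search window, instead of A's per-entity slice-comparison scan over every start position.
-- outside the precondition, e.g. on build_entity_turn_relations([5], [7], [], [3]): A returns {'entity_1': [7], 'entity_2': []}, B raises IndexError
import Mathlib
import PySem

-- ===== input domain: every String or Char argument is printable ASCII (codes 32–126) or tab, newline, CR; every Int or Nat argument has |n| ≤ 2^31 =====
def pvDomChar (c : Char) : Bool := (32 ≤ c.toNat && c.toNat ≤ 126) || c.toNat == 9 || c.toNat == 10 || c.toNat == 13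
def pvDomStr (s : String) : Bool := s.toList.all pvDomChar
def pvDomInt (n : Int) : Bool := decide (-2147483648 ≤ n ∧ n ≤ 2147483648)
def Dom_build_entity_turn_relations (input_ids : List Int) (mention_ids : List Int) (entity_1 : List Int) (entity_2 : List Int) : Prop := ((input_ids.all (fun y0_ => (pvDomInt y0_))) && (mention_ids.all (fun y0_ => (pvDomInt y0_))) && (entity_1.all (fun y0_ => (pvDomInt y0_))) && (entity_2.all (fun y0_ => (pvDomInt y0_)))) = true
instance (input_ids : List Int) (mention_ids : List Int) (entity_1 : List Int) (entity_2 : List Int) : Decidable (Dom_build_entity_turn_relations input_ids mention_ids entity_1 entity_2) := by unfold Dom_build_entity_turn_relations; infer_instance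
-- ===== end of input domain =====

-- B replaces A's per-entity slice-comparison scan over every start position by a
-- value→positions index built once, verifying an entity only at the candidate positions of
-- its first token inside the same search window (starts below len(input_ids)-len(entity)).

-- ===== PORT A =====
-- mention_ids[i] raises IndexError when i ≥ len(mention_ids); total form pyGetD, excluded by Pre_
def build_entity_turn_relations (input_ids : List Int) (mention_ids : List Int) (entity_1 : List Int) (entity_2 : List Int) : List (String × List Int) :=
  let l1 := (PySem.List.pyRange 0 ((input_ids.length : Int) - (entity_1.length : Int)) 1).foldl
    (fun acc i =>
      if PySem.List.slice input_ids (some i) (some (i + (entity_1.length : Int))) = entity_1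
      then acc ++ [PySem.List.pyGetD mention_ids i 0] else acc) []
  let l2 := (PySem.List.pyRange 0 ((input_ids.length : Int) - (entity_2.length : Int)) 1).foldl
    (fun acc i =>
      if PySem.List.slice input_ids (some i) (some (i + (entity_2.length : Int))) = entity_2
      then acc ++ [PySem.List.pyGetD mention_ids i 0] else acc) []
  [("entity_1", l1), ("entity_2", l2)]

-- ===== PORT B =====
-- helper 'mentions' of Source B; entity[0] raises IndexError on an empty entity (excluded by Pre_)
def betr_mentions (input_ids : List Int) (mention_ids : List Int) (index : PySem.Dict Int (List Int)) (entity : List Int) : List Int :=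
  let m : Int := entity.length
  let limit : Int := (input_ids.length : Int) - m
  ((index.getD (PySem.List.pyGetD entity 0 0) []).filter
      (fun i => decide (i < limit ∧ PySem.List.slice input_ids (some i) (some (i + m)) = entity))).map
    (fun i => PySem.List.pyGetD mention_ids i 0)

def build_entity_turn_relations_alt (input_ids : List Int) (mention_ids : List Int) (entity_1 : List Int) (entity_2 : List Int) : List (String × List Int) :=
  -- index.setdefault(v, []).append(i)  ≡  index[v] = index.get(v, []) + [i], keeping key position
  let index := (PySem.List.enumerate input_ids 0).foldl
    (fun d p => d.modify p.2 [] (· ++ [p.1])) PySem.Dict.empty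
  [("entity_1", betr_mentions input_ids mention_ids index entity_1),
   ("entity_2", betr_mentions input_ids mention_ids index entity_2)]

-- ===== PRECONDITION & SPEC =====
-- Pre_ excludes (a) empty entity patterns, on which A's "every position matches the empty
-- pattern" answer is an accident nobody specifies and B's entity[0] raises IndexError, and
-- (b) inputs where some in-window occurrence start of an entity lies outside mention_ids,
-- on which mention_ids[i] raises IndexError in both A and B.
def Pre_build_entity_turn_relations (input_ids : List Int) (mention_ids : List Int) (entity_1 : List Int) (entity_2 : List Int) : Prop :=
  entity_1 ≠ [] ∧ entity_2 ≠ [] ∧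
  ∀ i ∈ List.range input_ids.length,
    ((input_ids.drop i).take entity_1.length = entity_1 → i + entity_1.length < input_ids.length → i < mention_ids.length) ∧
    ((input_ids.drop i).take entity_2.length = entity_2 → i + entity_2.length < input_ids.length → i < mention_ids.length)
instance (input_ids : List Int) (mention_ids : List Int) (entity_1 : List Int) (entity_2 : List Int) : Decidable (Pre_build_entity_turn_relations input_ids mention_ids entity_1 entity_2) := by unfold Pre_build_entity_turn_relations; infer_instance

def pvWitness_build_entity_turn_relations : List Int × List Int × List Int × List Int := ([1, 2], [5, 6], [2], [1])

def Spec_build_entity_turn_relations (input_ids : List Int) (mention_ids : List Int) (entity_1 : List Int) (entity_2 : List Int) (out : List (String × List Int)) : Prop := out = build_entity_turn_relations_alt input_ids mention_ids entity_1 entity_2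
instance (input_ids : List Int) (mention_ids : List Int) (entity_1 : List Int) (entity_2 : List Int) (out : List (String × List Int)) : Decidable (Spec_build_entity_turn_relations input_ids mention_ids entity_1 entity_2 out) := by unfold Spec_build_entity_turn_relations; infer_instance

-- ===== CLAIM (what is proved, stated in full; the proofs are below) =====
def Claim_equal_build_entity_turn_relations : Prop := ∀ (input_ids : List Int) (mention_ids : List Int) (entity_1 : List Int) (entity_2 : List Int), Dom_build_entity_turn_relations input_ids mention_ids entity_1 entity_2 → Pre_build_entity_turn_relations input_ids mention_ids entity_1 entity_2 → Spec_build_entity_turn_relations input_ids mention_ids entity_1 entity_2 (build_entity_turn_relations input_ids mention_ids entity_1 entity_2)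

-- ===== LEMMAS AND PROOFS =====

-- A's per-entity list and B's index, named for the proofs
def betrA (xs ms pat : List Int) : List Int :=
  (PySem.List.pyRange 0 ((xs.length : Int) - (pat.length : Int)) 1).foldl
    (fun acc i =>
      if PySem.List.slice xs (some i) (some (i + (pat.length : Int))) = pat
      then acc ++ [PySem.List.pyGetD ms i 0] else acc) []

def betrIdx (xs : List Int) : PySem.Dict Int (List Int) :=
  (PySem.List.enumerate xs 0).foldl (fun d p => d.modify p.2 [] (· ++ [p.1])) PySem.Dict.empty

lemma betrA_spec (xs ms e1 e2 : List Int) :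
    build_entity_turn_relations xs ms e1 e2 =
      [("entity_1", betrA xs ms e1), ("entity_2", betrA xs ms e2)] := rfl

lemma betrB_spec (xs ms e1 e2 : List Int) :
    build_entity_turn_relations_alt xs ms e1 e2 =
      [("entity_1", betr_mentions xs ms (betrIdx xs) e1),
       ("entity_2", betr_mentions xs ms (betrIdx xs) e2)] := rfl

lemma betrA_filter (xs ms pat : List Int) :
    betrA xs ms pat =
      ((PySem.List.pyRange 0 ((xs.length : Int) - (pat.length : Int)) 1).filter
          (fun i => decide (PySem.List.slice xs (some i) (some (i + (pat.length : Int))) = pat))).map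
        (fun i => PySem.List.pyGetD ms i 0) := by
  unfold betrA
  rw [PySem.List.foldl_append_ite]
  simp

-- the grouping index looks up to exactly the positions of v, in order
lemma betrIdx_getD (xs : List Int) (v : Int) :
    (betrIdx xs).getD v [] =
      (PySem.List.pyRange 0 (xs.length : Int) 1).filter
        (fun j => PySem.List.pyGetD xs j 0 == v) := by
  unfold betrIdx
  rw [← List.foldl_map (f := fun (p : Int × Int) => (p.2, p.1))
        (g := fun (d : PySem.Dict Int (List Int)) q => d.modify q.1 [] (· ++ [q.2]))]
  rw [PySem.Dict.getD_foldl_modify_append]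
  rw [PySem.List.enumerate_eq_map_pyRange (d := 0)]
  simp [List.filter_map, List.map_map, Function.comp_def]

-- a slice match at a nonnegative position is an occurrence
lemma betr_match_iff (xs pat : List Int) (i : Int) (h0 : 0 ≤ i) :
    PySem.List.slice xs (some i) (some (i + (pat.length : Int))) = pat ↔
      (xs.drop i.toNat).take pat.length = pat := by
  rw [PySem.List.slice_toNat xs h0 (by omega)]
  have h2 : (i + (pat.length : Int)).toNat - i.toNat = pat.length := by omega
  rw [h2]

lemma betr_occ_facts (xs pat : List Int) (a : Nat) (hne : pat ≠ [])
    (h : (xs.drop a).take pat.length = pat) :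
    a + pat.length ≤ xs.length ∧ xs.getD a 0 = pat.getD 0 0 := by
  have hm : 0 < pat.length := List.length_pos_iff.mpr hne
  have hlen : ((xs.drop a).take pat.length).length = pat.length := by rw [h]
  rw [List.length_take, List.length_drop, Nat.min_def] at hlen
  have hle : a + pat.length ≤ xs.length := by split at hlen <;> omega
  refine ⟨hle, ?_⟩
  have h0 : pat[0]? = xs[a]? := by
    conv_lhs => rw [← h]
    rw [List.getElem?_take_of_lt hm, List.getElem?_drop]
    norm_num
  simp [List.getD, h0]

-- B's candidate filter over all positions equals the windowed occurrence test
lemma betrB_filter (xs ms pat : List Int) (hne : pat ≠ []) :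
    betr_mentions xs ms (betrIdx xs) pat =
      ((PySem.List.pyRange 0 ((xs.length : Int)) 1).filter
          (fun i => decide (i < (xs.length : Int) - (pat.length : Int) ∧
            PySem.List.slice xs (some i) (some (i + (pat.length : Int))) = pat))).map
        (fun i => PySem.List.pyGetD ms i 0) := by
  unfold betr_mentions
  dsimp only
  rw [betrIdx_getD, List.filter_filter]
  congr 1
  apply List.filter_congr
  intro j hj
  rw [PySem.List.mem_pyRange_one] at hj
  by_cases hmt : PySem.List.slice xs (some j) (some (j + (pat.length : Int))) = pat
  · have hmt' := (betr_match_iff xs pat j hj.1).mp hmt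
    obtain ⟨hle, hhead⟩ := betr_occ_facts xs pat j.toNat hne hmt'
    have hm : 0 < pat.length := List.length_pos_iff.mpr hne
    rw [List.getD_eq_getElem xs 0 (by omega), List.getD_eq_getElem pat 0 (by omega)] at hhead
    have hx : PySem.List.pyGetD xs j 0 = xs[j.toNat] :=
      PySem.List.pyGetD_eq_getElem xs 0 hj.1 (by simpa using hj.2)
    have hp : PySem.List.pyGetD pat 0 0 = pat[0] := by
      rw [PySem.List.pyGetD_zero]
      exact List.getD_eq_getElem pat 0 (by omega)
    simp [hmt, hx, hp, hhead]
  · simp [hmt]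

-- restricting the full range by the window condition is A's range
lemma betr_filter_window (xs pat : List Int) (hne : pat ≠ []) :
    (PySem.List.pyRange 0 ((xs.length : Int)) 1).filter
        (fun i => decide (i < (xs.length : Int) - (pat.length : Int) ∧
          PySem.List.slice xs (some i) (some (i + (pat.length : Int))) = pat)) =
      (PySem.List.pyRange 0 ((xs.length : Int) - (pat.length : Int)) 1).filter
        (fun i => decide (PySem.List.slice xs (some i) (some (i + (pat.length : Int))) = pat)) := by
  have hm0 : 0 < pat.length := List.length_pos_iff.mpr hne
  by_cases hm : pat.length ≤ xs.length
  · rw [PySem.List.pyRange_one_append 0 ((xs.length : Int) - (pat.length : Int)) ((xs.length : Int)) (by omega) (by omega)]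
    rw [List.filter_append]
    have hright : (PySem.List.pyRange ((xs.length : Int) - (pat.length : Int)) ((xs.length : Int)) 1).filter
        (fun i => decide (i < (xs.length : Int) - (pat.length : Int) ∧
          PySem.List.slice xs (some i) (some (i + (pat.length : Int))) = pat)) = [] := by
      rw [List.filter_eq_nil_iff]
      intro j hj
      rw [PySem.List.mem_pyRange_one] at hj
      intro hc
      rw [decide_eq_true_eq] at hc
      have := hc.1
      omega
    rw [hright, List.append_nil]
    apply List.filter_congr
    intro j hj
    rw [PySem.List.mem_pyRange_one] at hj
    exact decide_eq_decide.mpr (and_iff_right hj.2)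
  · conv_rhs => rw [PySem.List.pyRange_one_eq_nil (by omega)]
    rw [List.filter_nil, List.filter_eq_nil_iff]
    intro j hj
    rw [PySem.List.mem_pyRange_one] at hj
    intro hc
    rw [decide_eq_true_eq] at hc
    have := hc.1
    omega

lemma betr_entity_eq (xs ms pat : List Int) (hne : pat ≠ []) :
    betrA xs ms pat = betr_mentions xs ms (betrIdx xs) pat := by
  rw [betrA_filter, betrB_filter xs ms pat hne, betr_filter_window xs pat hne]

-- ===== VERDICT (by name: the statement is the Claim_ definition above) =====
theorem build_entity_turn_relations_spec : Claim_equal_build_entity_turn_relations := by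
  intro xs ms e1 e2 _ hpre
  obtain ⟨h1, h2, -⟩ := hpre
  unfold Spec_build_entity_turn_relations
  rw [betrA_spec, betrB_spec, betr_entity_eq xs ms e1 h1, betr_entity_eq xs ms e2 h2]
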